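-- pv_equiv track=rewrite | github.com/amaysaxena/Google-Foobar | Level 4/running_with_bunnies.py | answer
-- ===== SOURCE A (Python) =====
-- from itertools import chain, combinations, permutations
--
-- def answer(times, time_limit):
--     if len(times) <= 2:
--         return []
--     n = len(times)
--     bunny_ids = list(range(n - 2))
--     shortest_dist = floyd_warshall(times)
--
--     if negative_cycle(shortest_dist):
--         # Negative cycle found. Save all the bunnies!
--         return bunny_ids
--
--     optimal_bunnies = []
--     # Check each subset of the bunny_ids by brute force to find
--     # optimal sequence
--     ps = sorted(powerset(bunny_ids))
--     for s in ps:
--         for sequence in permutations(s):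
--             if path_length(sequence, shortest_dist) <= time_limit:
--                 if len(sequence) > len(optimal_bunnies):
--                     optimal_bunnies = list(s)
--                     if len(optimal_bunnies) == n - 2:
--                         break
--     return optimal_bunnies
--
-- def path_length(sequence, shortest_dist):
--     bunny_indices = [id + 1 for id in sequence]
--     # This is the path taken. starts from starting point (index 0), then
--     # goes through the sequence of bunnies, and finally ends at the gate.
--     indices_to_visit = [0] + bunny_indices + [len(shortest_dist) - 1]
--
--     # Sum the lengths of each arc. sum = dist(node0, node1) + dist(node1, node2) ... dist(nodeN-1, nodeN)
--     return sum([shortest_dist[indices_to_visit[i]][indices_to_visit[i+1]]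
--                for i in range(len(indices_to_visit) - 1)])
--
-- def floyd_warshall(times):
--     n = len(times)
--     for k in range(n):
--         for i in range(n):
--             for j in range(n):
--                 if times[i][k] + times[k][j] < times[i][j]:
--                     times[i][j] = times[i][k] + times[k][j]
--     return times
--
-- def negative_cycle(times):
--     return any([times[i][i] < 0 for i in range(len(times))])
--
-- def powerset(iterable):
--     # s = list(iterable)
--     # return chain.from_iterable(combinations(s, r) for r in range(len(s)+1))
--     x = len(iterable)
--     masks = [1 << i for i in range(x)]
--     for i in range(1 << x):
--         yield [ss for mask, ss in zip(masks, iterable) if i & mask]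
-- ===== SOURCE B (Python) =====
-- # B: same answer as A, but feasibility of a subset is decided by a Held-Karp style
-- # memoized DP over (current node, remaining set) instead of brute force over all
-- # permutations of the subset.  (A also mutates `times` in place; B does not --
-- # the equivalence claimed is about the return value.)
-- def answer(times, time_limit):
--     n = len(times)
--     if n <= 2:
--         return []
--     dist = [list(row) for row in times]
--     for k in range(n):
--         for i in range(n):
--             for j in range(n):
--                 if dist[i][k] + dist[k][j] < dist[i][j]:
--                     dist[i][j] = dist[i][k] + dist[k][j]
--     if any(dist[i][i] < 0 for i in range(n)):
--         return list(range(n - 2))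
--     m = n - 2
--     memo = {}
--
--     def hk(j, rest):
--         # cheapest walk that starts at bunny j, picks up every bunny of `rest`,
--         # and ends at the gate (node n - 1)
--         if not rest:
--             return dist[j + 1][n - 1]
--         key = (j, rest)
--         if key not in memo:
--             memo[key] = min(dist[j + 1][rest[i] + 1]
--                             + hk(rest[i], rest[:i] + rest[i + 1:])
--                             for i in range(len(rest)))
--         return memo[key]
--
--     def exit_cost(s):
--         # cheapest walk start (node 0) -> all bunnies of s -> gate
--         if not s:
--             return dist[0][n - 1]
--         return min(dist[0][s[i] + 1] + hk(s[i], s[:i] + s[i + 1:])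
--                    for i in range(len(s)))
--
--     subsets = sorted([j for j in range(m) if (i >> j) & 1] for i in range(1 << m))
--     best = []
--     for s in subsets:
--         if len(s) > len(best) and exit_cost(tuple(s)) <= time_limit:
--             best = s
--     return best
-- ===== Notes on version B (the rewrite author's own statement) =====
-- stated objective: alternative
-- what changed: A decides feasibility of each bunny subset by brute-forcing all permutations of it (itertools.permutations); B instead computes the subset's best pickup order with a Held-Karp style memoized DP over (current bunny, remaining set), a different algorithm per subset (exponential subset enumeration remains in both).
import Mathlib
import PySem

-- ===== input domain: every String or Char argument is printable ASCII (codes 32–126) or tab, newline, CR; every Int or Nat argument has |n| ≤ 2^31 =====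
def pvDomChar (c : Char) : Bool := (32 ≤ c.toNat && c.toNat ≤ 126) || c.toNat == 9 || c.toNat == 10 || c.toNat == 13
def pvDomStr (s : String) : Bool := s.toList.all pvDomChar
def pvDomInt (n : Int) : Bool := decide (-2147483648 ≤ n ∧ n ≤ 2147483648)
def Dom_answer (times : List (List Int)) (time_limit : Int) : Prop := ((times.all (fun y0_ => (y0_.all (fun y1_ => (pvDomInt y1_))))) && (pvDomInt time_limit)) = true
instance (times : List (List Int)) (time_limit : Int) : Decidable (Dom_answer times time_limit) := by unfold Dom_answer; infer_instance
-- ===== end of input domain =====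

-- B replaces A's per-subset brute force over all permutations by a memoized
-- Held-Karp style DP over (current bunny, remaining set); A also mutates `times`
-- in place (its Floyd-Warshall), B does not — the equivalence is about the return value.

-- shared index helpers: matrix read with Nat indices / Python Int indices, and a matrix write
def pvG (d : List (List Int)) (i j : Nat) : Int := (d.getD i []).getD j 0
def pvGI (d : List (List Int)) (i j : Int) : Int :=
  PySem.List.pyGetD (PySem.List.pyGetD d i []) j 0
def pvSet (d : List (List Int)) (i j : Nat) (v : Int) : List (List Int) :=
  d.set i ((d.getD i []).set j v)

-- ===== PORT A =====
def floydWarshall (t : List (List Int)) : List (List Int) :=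
  let n := t.length
  (List.range n).foldl (fun d k =>
    (List.range n).foldl (fun d i =>
      (List.range n).foldl (fun d j =>
        if pvG d i k + pvG d k j < pvG d i j then pvSet d i j (pvG d i k + pvG d k j) else d)
        d) d) t

def negCycle (d : List (List Int)) : Bool :=
  ((List.range d.length).map (fun i => decide (pvG d i i < 0))).any id

def pathLength (seq : List Int) (d : List (List Int)) : Int :=
  let iv : List Int := [0] ++ seq.map (· + 1) ++ [(d.length : Int) - 1]
  ((List.range (iv.length - 1)).map (fun i => pvGI d (iv.getD i 0) (iv.getD (i + 1) 0))).sum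

def powersetA (ids : List Int) : List (List Int) :=
  let x := ids.length
  let masks := (List.range x).map (fun i => 1 <<< i)
  (List.range (2 ^ x)).map (fun i =>
    ((masks.zip ids).filter (fun p => i &&& p.1 != 0)).map (fun p => p.2))

-- the inner `for sequence in permutations(s)` loop of A (its `break` is the Bool flag)
def innerA (nn : Nat) (tl : Int) (sd : List (List Int)) (opt : List Int) (s : List Int) :
    List Int :=
  ((PySem.List.permutations s s.length).foldl (fun st seq =>
      if st.2 then st
      else if pathLength seq sd ≤ tl then
        if seq.length > st.1.length then (s, decide (s.length = nn - 2)) else st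
      else st)
    ((opt, false) : List Int × Bool)).1

def answer (times : List (List Int)) (time_limit : Int) : List Int :=
  if times.length ≤ 2 then []
  else
    let n := times.length
    let bunnyIds : List Int := (List.range (n - 2)).map (fun i => Int.ofNat i)
    let sd := floydWarshall times
    if negCycle sd then bunnyIds
    else
      let ps := PySem.List.sorted (powersetA bunnyIds) (fun s => s) false
      ps.foldl (innerA n time_limit sd) []

-- ===== PORT B =====
-- min() over a list of ints (nonempty at every call site below)
def pyminI (l : List Int) : Int := (PySem.List.min? l (fun x => x)).getD 0

def fwAlt (t : List (List Int)) : List (List Int) :=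
  let n := t.length
  let dist := t.map (fun row => row)
  (List.range n).foldl (fun d k =>
    (List.range n).foldl (fun d i =>
      (List.range n).foldl (fun d j =>
        if pvG d i k + pvG d k j < pvG d i j then pvSet d i j (pvG d i k + pvG d k j) else d)
        d) d) dist

def negAlt (d : List (List Int)) : Bool :=
  ((List.range d.length).map (fun i => decide (pvG d i i < 0))).any id

-- hk(j, rest): cheapest walk bunny j -> all bunnies of rest -> gate (column e = n-1);
-- Source B memoizes this recursion, memoization does not change the value
def hkAlt (d : List (List Int)) (e : Int) (j : Int) (rest : List Int) : Int :=
  if rest = [] then pvGI d (j + 1) e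
  else
    pyminI ((List.range rest.length).attach.map (fun i =>
      pvGI d (j + 1) (rest.getD i.1 0 + 1) + hkAlt d e (rest.getD i.1 0) (rest.eraseIdx i.1)))
termination_by rest.length
decreasing_by
  have hi : i.1 < rest.length := List.mem_range.mp i.2
  rw [List.length_eraseIdx]
  simp only [hi, if_pos]
  omega

def exitAlt (d : List (List Int)) (nn : Nat) (s : List Int) : Int :=
  if s = [] then pvGI d 0 ((nn : Int) - 1)
  else
    pyminI ((List.range s.length).map (fun i =>
      pvGI d 0 (s.getD i 0 + 1) + hkAlt d ((nn : Int) - 1) (s.getD i 0) (s.eraseIdx i)))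

def subsetsAlt (m : Nat) : List (List Int) :=
  PySem.List.sorted ((List.range (2 ^ m)).map (fun i =>
    ((List.range m).filter (fun j => (i >>> j) &&& 1 != 0)).map (fun j => Int.ofNat j)))
    (fun s => s) false

def answer_alt (times : List (List Int)) (time_limit : Int) : List Int :=
  if times.length ≤ 2 then []
  else
    let n := times.length
    let dist := fwAlt times
    if negAlt dist then (List.range (n - 2)).map (fun i => Int.ofNat i)
    else
      (subsetsAlt (n - 2)).foldl (fun best s =>
        if s.length > best.length ∧ exitAlt dist n s ≤ time_limit then s else best) []

-- ===== PRECONDITION & SPEC =====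
-- Pre_ excludes exactly the ragged matrices on which A's indexing raises IndexError:
-- with more than two rows, every row must have at least `len(times)` entries.
def Pre_answer (times : List (List Int)) (time_limit : Int) : Prop :=
  times.length ≤ 2 ∨ ∀ row ∈ times, times.length ≤ row.length
instance (times : List (List Int)) (time_limit : Int) : Decidable (Pre_answer times time_limit) := by
  unfold Pre_answer; infer_instance

def pvWitness_answer : List (List Int) × Int := ([[0, 2, 2, 2], [2, 0, 2, 2], [2, 2, 0, 2], [2, 2, 2, 0]], 5)

def Spec_answer (times : List (List Int)) (time_limit : Int) (out : List Int) : Prop :=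
  out = answer_alt times time_limit
instance (times : List (List Int)) (time_limit : Int) (out : List Int) :
    Decidable (Spec_answer times time_limit out) := by unfold Spec_answer; infer_instance

-- ===== CLAIM (what is proved, stated in full; the proofs are below) =====
def Claim_equal_answer : Prop := ∀ (times : List (List Int)) (time_limit : Int),
  Dom_answer times time_limit → Pre_answer times time_limit →
  Spec_answer times time_limit (answer times time_limit)

-- ===== LEMMAS AND PROOFS =====

-- abbreviation used only in proofs: the full-length permutation list of A's inner loop
def permsOf (xs : List Int) : List (List Int) := PySem.List.permutations xs xs.length

-- tail cost of a walk: tcF d e j q = cost of j -> q... -> gate column e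
def tcF (d : List (List Int)) (e : Int) : Int → List Int → Int
  | j, [] => pvGI d (j + 1) e
  | j, k :: q => pvGI d (j + 1) (k + 1) + tcF d e k q

-- full cost of the walk 0 -> p... -> gate column e, as A's path_length computes it
def costF (d : List (List Int)) (e : Int) : List Int → Int
  | [] => pvGI d 0 e
  | j :: q => pvGI d 0 (j + 1) + tcF d e j q

-- consecutive-arc sum of an index list
def sumArcs (d : List (List Int)) : List Int → Int
  | a :: b :: r => pvGI d a b + sumArcs d (b :: r)
  | _ => 0

lemma permsOf_nil : permsOf [] = [[]] := by decide

lemma permsOf_ne_nil_eq (xs : List Int) (h : xs ≠ []) :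
    permsOf xs = (List.range xs.length).flatMap (fun i =>
      (permsOf (xs.eraseIdx i)).map (fun p => xs.getD i 0 :: p)) := by
  obtain ⟨r, hr⟩ : ∃ r, xs.length = r + 1 := by
    cases xs with | nil => exact absurd rfl h | cons a t => exact ⟨t.length, rfl⟩
  unfold permsOf
  rw [hr, PySem.List.permutations.eq_def]
  simp only
  rw [← hr]
  apply List.flatMap_congr
  intro i hi
  have hilt : i < xs.length := List.mem_range.mp hi
  have hsome : xs[i]? = some xs[i] := List.getElem?_eq_getElem hilt
  rw [hsome]
  simp only
  congr 1
  · funext p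
    rw [List.getD_eq_getElem xs 0 hilt]
  · congr 1
    rw [List.length_eraseIdx]
    simp [hr]
    omega

lemma mem_permsOf_length : ∀ (xs : List Int), ∀ p ∈ permsOf xs, p.length = xs.length := by
  intro xs
  induction hn : xs.length using Nat.strong_induction_on generalizing xs with
  | _ n ih =>
    intro p hp
    rcases eq_or_ne xs [] with rfl | hne
    · rw [permsOf_nil] at hp; simp at hp; simp [hp]; simpa using hn
    · rw [permsOf_ne_nil_eq xs hne] at hp
      rw [List.mem_flatMap] at hp
      obtain ⟨i, hi, hmem⟩ := hp
      have hilt : i < xs.length := List.mem_range.mp hi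
      rw [List.mem_map] at hmem
      obtain ⟨q, hq, rfl⟩ := hmem
      have hlen : (xs.eraseIdx i).length = n - 1 := by
        rw [List.length_eraseIdx]; simp [hilt]; omega
      have hq' := ih (n-1) (by omega) (xs.eraseIdx i) hlen q hq
      simp [hq']
      omega

lemma pymin_mem {l : List Int} (h : l ≠ []) : pyminI l ∈ l := by
  unfold pyminI
  cases hm : PySem.List.min? l (fun x => x) with
  | none => exact absurd ((PySem.List.min?_eq_none_iff l _).mp hm) h
  | some m => simpa using PySem.List.min?_mem hm

lemma pymin_le {l : List Int} (h : l ≠ []) : ∀ y ∈ l, pyminI l ≤ y := by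
  unfold pyminI
  cases hm : PySem.List.min? l (fun x => x) with
  | none => exact absurd ((PySem.List.min?_eq_none_iff l _).mp hm) h
  | some m => simpa using PySem.List.min?_isMin hm

lemma hkAlt_cands_ne_nil (d : List (List Int)) (e j : Int) {rest : List Int} (h : rest ≠ []) :
    ((List.range rest.length).attach.map (fun i =>
      pvGI d (j + 1) (rest.getD i.1 0 + 1) + hkAlt d e (rest.getD i.1 0) (rest.eraseIdx i.1))) ≠ [] := by
  simp [List.length_eq_zero_iff, h]

lemma hkAlt_le (d : List (List Int)) (e : Int) :
    ∀ (rest : List Int) (j : Int), ∀ p ∈ permsOf rest, hkAlt d e j rest ≤ tcF d e j p := by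
  intro rest
  induction hn : rest.length using Nat.strong_induction_on generalizing rest with
  | _ n ih =>
    intro j p hp
    rcases eq_or_ne rest [] with rfl | hne
    · rw [permsOf_nil] at hp; simp at hp; subst hp
      rw [hkAlt]; simp [tcF]
    · rw [permsOf_ne_nil_eq rest hne] at hp
      rw [List.mem_flatMap] at hp
      obtain ⟨i, hi, hmem⟩ := hp
      have hilt : i < rest.length := List.mem_range.mp hi
      rw [List.mem_map] at hmem
      obtain ⟨q, hq, rfl⟩ := hmem
      have hlen : (rest.eraseIdx i).length = n - 1 := by
        rw [List.length_eraseIdx]; simp [hilt]; omega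
      have htail := ih (n - 1) (by omega) (rest.eraseIdx i) hlen (rest.getD i 0) q hq
      have hcand : pvGI d (j + 1) (rest.getD i 0 + 1) + hkAlt d e (rest.getD i 0) (rest.eraseIdx i)
          ∈ ((List.range rest.length).attach.map (fun i =>
            pvGI d (j + 1) (rest.getD i.1 0 + 1) + hkAlt d e (rest.getD i.1 0) (rest.eraseIdx i.1))) := by
        rw [List.mem_map]
        exact ⟨⟨i, hi⟩, List.mem_attach _ _, rfl⟩
      have hmin := pymin_le (hkAlt_cands_ne_nil d e j hne) _ hcand
      rw [hkAlt]
      simp only [hne, if_false]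
      calc _ ≤ _ := hmin
        _ ≤ _ := by simp [tcF]; exact htail

lemma hkAlt_attained (d : List (List Int)) (e : Int) :
    ∀ (rest : List Int) (j : Int), ∃ p ∈ permsOf rest, tcF d e j p = hkAlt d e j rest := by
  intro rest
  induction hn : rest.length using Nat.strong_induction_on generalizing rest with
  | _ n ih =>
    intro j
    rcases eq_or_ne rest [] with rfl | hne
    · exact ⟨[], by rw [permsOf_nil]; simp, by rw [hkAlt]; simp [tcF]⟩
    · have hm := pymin_mem (hkAlt_cands_ne_nil d e j hne)
      rw [List.mem_map] at hm
      obtain ⟨⟨i, hi⟩, _, hval⟩ := hm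
      have hilt : i < rest.length := List.mem_range.mp hi
      have hlen : (rest.eraseIdx i).length = n - 1 := by
        rw [List.length_eraseIdx]; simp [hilt]; omega
      obtain ⟨q, hq, hqval⟩ := ih (n - 1) (by omega) (rest.eraseIdx i) hlen (rest.getD i 0)
      refine ⟨rest.getD i 0 :: q, ?_, ?_⟩
      · rw [permsOf_ne_nil_eq rest hne, List.mem_flatMap]
        exact ⟨i, hi, List.mem_map.mpr ⟨q, hq, rfl⟩⟩
      · rw [hkAlt]
        simp only [hne, if_false]
        rw [← hval]
        simp only [tcF]
        exact congrArg _ hqval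

lemma exit_cands_ne_nil (d : List (List Int)) (nn : Nat) {s : List Int} (h : s ≠ []) :
    ((List.range s.length).map (fun i =>
      pvGI d 0 (s.getD i 0 + 1) + hkAlt d ((nn : Int) - 1) (s.getD i 0) (s.eraseIdx i))) ≠ [] := by
  simp [List.length_eq_zero_iff, h]

lemma exitAlt_le (d : List (List Int)) (nn : Nat) (s : List Int) :
    ∀ p ∈ permsOf s, exitAlt d nn s ≤ costF d ((nn : Int) - 1) p := by
  intro p hp
  rcases eq_or_ne s [] with rfl | hne
  · rw [permsOf_nil] at hp; simp at hp; subst hp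
    simp [exitAlt, costF]
  · rw [permsOf_ne_nil_eq s hne, List.mem_flatMap] at hp
    obtain ⟨i, hi, hmem⟩ := hp
    rw [List.mem_map] at hmem
    obtain ⟨q, hq, rfl⟩ := hmem
    have hcand : pvGI d 0 (s.getD i 0 + 1) + hkAlt d ((nn : Int) - 1) (s.getD i 0) (s.eraseIdx i)
        ∈ ((List.range s.length).map (fun i =>
          pvGI d 0 (s.getD i 0 + 1) + hkAlt d ((nn : Int) - 1) (s.getD i 0) (s.eraseIdx i))) :=
      List.mem_map.mpr ⟨i, hi, rfl⟩
    have hmin := pymin_le (exit_cands_ne_nil d nn hne) _ hcand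
    have htail := hkAlt_le d ((nn : Int) - 1) (s.eraseIdx i) (s.getD i 0) q hq
    simp only [exitAlt, hne, if_false]
    calc _ ≤ _ := hmin
      _ ≤ _ := by simp only [costF]; omega

lemma exitAlt_attained (d : List (List Int)) (nn : Nat) (s : List Int) :
    ∃ p ∈ permsOf s, costF d ((nn : Int) - 1) p = exitAlt d nn s := by
  rcases eq_or_ne s [] with rfl | hne
  · exact ⟨[], by rw [permsOf_nil]; simp, by simp [exitAlt, costF]⟩
  · have hm := pymin_mem (exit_cands_ne_nil d nn hne)
    rw [List.mem_map] at hm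
    obtain ⟨i, hi, hval⟩ := hm
    obtain ⟨q, hq, hqval⟩ := hkAlt_attained d ((nn : Int) - 1) (s.eraseIdx i) (s.getD i 0)
    refine ⟨s.getD i 0 :: q, ?_, ?_⟩
    · rw [permsOf_ne_nil_eq s hne, List.mem_flatMap]
      exact ⟨i, hi, List.mem_map.mpr ⟨q, hq, rfl⟩⟩
    · simp only [exitAlt, hne, if_false]
      rw [← hval]
      simp only [costF]
      exact congrArg _ hqval

lemma exitAlt_iff (d : List (List Int)) (nn : Nat) (tl : Int) (s : List Int) :
    (∃ p ∈ permsOf s, costF d ((nn : Int) - 1) p ≤ tl) ↔ exitAlt d nn s ≤ tl := by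
  constructor
  · rintro ⟨p, hp, hle⟩
    exact le_trans (exitAlt_le d nn s p hp) hle
  · intro h
    obtain ⟨p, hp, hval⟩ := exitAlt_attained d nn s
    exact ⟨p, hp, hval ▸ h⟩

lemma range_map_sum_eq_sumArcs (d : List (List Int)) :
    ∀ l : List Int,
      ((List.range (l.length - 1)).map (fun i => pvGI d (l.getD i 0) (l.getD (i + 1) 0))).sum
        = sumArcs d l := by
  intro l
  induction l with
  | nil => simp [sumArcs]
  | cons a t ih =>
    cases t with
    | nil => simp [sumArcs]
    | cons b r =>
      have hlen : (a :: b :: r).length - 1 = (b :: r).length := by simp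
      rw [hlen]
      have hlen2 : (b :: r).length = ((b :: r).length - 1) + 1 := by simp
      rw [hlen2, List.range_succ_eq_map]
      simp only [List.map_cons, List.sum_cons, List.map_map]
      show pvGI d a b + _ = sumArcs d (a :: b :: r)
      rw [show sumArcs d (a :: b :: r) = pvGI d a b + sumArcs d (b :: r) from rfl]
      congr 1

lemma sumArcs_tail (d : List (List Int)) (e : Int) :
    ∀ (q : List Int) (j : Int),
      sumArcs d ((j + 1) :: q.map (· + 1) ++ [e]) = tcF d e j q := by
  intro q
  induction q with
  | nil => intro j; simp [sumArcs, tcF]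
  | cons k r ih =>
    intro j
    show pvGI d (j + 1) (k + 1) + _ = _
    rw [show tcF d e j (k :: r) = pvGI d (j + 1) (k + 1) + tcF d e k r from rfl]
    exact congrArg _ (ih k)

lemma pathLength_eq_costF (d : List (List Int)) (seq : List Int) :
    pathLength seq d = costF d ((d.length : Int) - 1) seq := by
  unfold pathLength
  rw [range_map_sum_eq_sumArcs]
  cases seq with
  | nil => simp [sumArcs, costF]
  | cons j q =>
    show pvGI d 0 (j + 1) + sumArcs d ((j + 1) :: q.map (· + 1) ++ [(d.length : Int) - 1]) = _
    rw [show costF d ((d.length : Int) - 1) (j :: q)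
        = pvGI d 0 (j + 1) + tcF d ((d.length : Int) - 1) j q from rfl]
    exact congrArg _ (sumArcs_tail d _ q j)

lemma foldl_flag_true (step : List Int × Bool → List Int → List Int × Bool)
    (hstep : ∀ st x, st.2 = true → step st x = st) :
    ∀ (L : List (List Int)) (o : List Int), L.foldl step (o, true) = (o, true) := by
  intro L
  induction L with
  | nil => intro o; rfl
  | cons p L ih => intro o; rw [List.foldl_cons, hstep (o, true) p rfl]; exact ih o

lemma innerA_eq (nn : Nat) (tl : Int) (sd : List (List Int)) (opt s : List Int) :
    innerA nn tl sd opt s =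
      if (∃ p ∈ permsOf s, pathLength p sd ≤ tl) ∧ s.length > opt.length then s else opt := by
  unfold innerA
  have hlenall := mem_permsOf_length s
  set step := fun (st : List Int × Bool) (seq : List Int) =>
      if st.2 then st
      else if pathLength seq sd ≤ tl then
        if seq.length > st.1.length then (s, decide (s.length = nn - 2)) else st
      else st with hstepdef
  have hflag : ∀ st x, st.2 = true → step st x = st := by
    intro st x h; simp [hstepdef, h]
  suffices h : ∀ (L : List (List Int)), (∀ p ∈ L, p.length = s.length) → ∀ (o : List Int),
      (L.foldl step (o, false)).1 =
        if (∃ p ∈ L, pathLength p sd ≤ tl) ∧ s.length > o.length then s else o by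
    exact h (permsOf s) hlenall opt
  intro L
  induction L with
  | nil => intro _ o; simp
  | cons p L ih =>
    intro hlen o
    have hplen : p.length = s.length := hlen p (List.mem_cons_self)
    rw [List.foldl_cons]
    by_cases hp : pathLength p sd ≤ tl
    · by_cases hgt : s.length > o.length
      · have hst : step (o, false) p = (s, decide (s.length = nn - 2)) := by
          simp [hstepdef, hp, hplen, hgt]
        rw [hst]
        have hex : (∃ q ∈ p :: L, pathLength q sd ≤ tl) := ⟨p, List.mem_cons_self, hp⟩
        cases hdec : decide (s.length = nn - 2) with
        | true =>
          rw [foldl_flag_true step hflag]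
          rw [if_pos ⟨hex, hgt⟩]
        | false =>
          rw [ih (fun q hq => hlen q (List.mem_cons_of_mem _ hq)) s]
          rw [if_neg (by simp), if_pos ⟨hex, hgt⟩]
      · have hst : step (o, false) p = (o, false) := by
          simp [hstepdef, hp, hplen]
          omega
        rw [hst, ih (fun q hq => hlen q (List.mem_cons_of_mem _ hq)) o]
        simp [hgt]
    · have hst : step (o, false) p = (o, false) := by simp [hstepdef, hp]
      rw [hst, ih (fun q hq => hlen q (List.mem_cons_of_mem _ hq)) o]
      by_cases hgt : s.length > o.length
      · simp only [hgt, and_true]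
        congr 1
        simp only [List.mem_cons, eq_iff_iff]
        constructor
        · rintro ⟨q, hq, hqle⟩; exact ⟨q, Or.inr hq, hqle⟩
        · rintro ⟨q, hq | hq, hqle⟩
          · subst hq; exact absurd hqle hp
          · exact ⟨q, hq, hqle⟩
      · simp [hgt]

lemma foldl_length_inv {α : Type} (f : List (List Int) → α → List (List Int)) (l : List α)
    (h : ∀ t x, (f t x).length = t.length) :
    ∀ t, (l.foldl f t).length = t.length := by
  induction l with
  | nil => intro t; rfl
  | cons a l ih => intro t; rw [List.foldl_cons, ih, h]

lemma length_floydWarshall (t : List (List Int)) : (floydWarshall t).length = t.length := by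
  unfold floydWarshall
  apply foldl_length_inv
  intro d k
  apply foldl_length_inv
  intro d i
  apply foldl_length_inv
  intro d j
  dsimp only
  split
  · simp [pvSet]
  · rfl

lemma fwAlt_eq (t : List (List Int)) : fwAlt t = floydWarshall t := by
  unfold fwAlt floydWarshall
  simp

lemma negAlt_eq (d : List (List Int)) : negAlt d = negCycle d := rfl

lemma subsets_eq (m : Nat) :
    PySem.List.sorted (powersetA ((List.range m).map (fun i => Int.ofNat i))) (fun s => s) false =
      subsetsAlt m := by
  unfold subsetsAlt
  congr 1
  unfold powersetA
  simp only [List.length_map, List.length_range]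
  apply List.map_congr_left
  intro i _
  rw [List.zip_map', List.filter_map, List.map_map]
  have hfil : List.filter ((fun p => i &&& p.1 != 0) ∘ fun a => ((1 <<< a : Nat), Int.ofNat a)) (List.range m)
      = List.filter (fun j => i >>> j &&& 1 != 0) (List.range m) := by
    apply List.filter_congr
    intro j _
    simp only [Function.comp_apply]
    have h1 : (1 : Nat) <<< j = 2 ^ j := Nat.one_shiftLeft j
    have h2 : i &&& 2 ^ j = (i.testBit j).toNat * 2 ^ j := Nat.and_two_pow i j
    have h3 : (i >>> j) &&& 1 = (i >>> j) % 2 := Nat.and_one_is_mod _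
    have h4 : i.testBit j = ((i >>> j) % 2 == 1) := by
      rw [Nat.testBit, Nat.and_comm, Nat.and_one_is_mod]
      rcases Nat.mod_two_eq_zero_or_one (i >>> j) with h | h <;> simp [h]
    rw [h1, h2, h3, h4]
    cases hb : (i >>> j) % 2 == 1 with
    | true => simp [hb]
    | false =>
      have h0 : (i >>> j) % 2 = 0 := by
        rcases Nat.mod_two_eq_zero_or_one (i >>> j) with h | h
        · exact h
        · rw [h] at hb; simp at hb
      simp [h0]
  rw [hfil]
  apply List.map_congr_left
  intro a _
  rfl

-- ===== VERDICT (by name: the statement is the Claim_ definition above) =====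
theorem answer_spec : Claim_equal_answer := by
  intro times time_limit _ _
  show answer times time_limit = answer_alt times time_limit
  unfold answer answer_alt
  by_cases h2 : times.length ≤ 2
  · rw [if_pos h2, if_pos h2]
  · rw [if_neg h2, if_neg h2]
    simp only [fwAlt_eq, negAlt_eq]
    by_cases hneg : negCycle (floydWarshall times)
    · rw [if_pos hneg, if_pos hneg]
    · rw [if_neg hneg, if_neg hneg]
      rw [subsets_eq]
      apply PySem.List.foldl_congr_mem
      intro acc s _
      rw [innerA_eq]
      have hfe : (∃ p ∈ permsOf s, pathLength p (floydWarshall times) ≤ time_limit)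
          ↔ exitAlt (floydWarshall times) times.length s ≤ time_limit := by
        rw [← exitAlt_iff]
        constructor
        · rintro ⟨p, hp, hle⟩
          refine ⟨p, hp, ?_⟩
          rwa [pathLength_eq_costF, length_floydWarshall] at hle
        · rintro ⟨p, hp, hle⟩
          refine ⟨p, hp, ?_⟩
          rwa [pathLength_eq_costF, length_floydWarshall]
      rw [if_congr (Iff.trans (and_congr_left' hfe) and_comm) rfl rfl]
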